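-- pv_equiv track=rewrite | github.com/IcaroPablo/python-practice | dijkstra.py | is_this
-- ===== SOURCE A (Python) =====
-- def is_this(node, not_visited):
--     try:
--         a = 1/((node[0] - not_visited[0][0]) + (node[1] - not_visited[0][1]))
--         return is_this(node, not_visited[1:])
--     except IndexError:
--         return 0
--     except ZeroDivisionError:
--         return 1
-- ===== SOURCE B (Python) =====
-- def is_this(node, not_visited):
--     target = node[0] + node[1]
--     return 1 if any(v[0] + v[1] == target for v in not_visited) else 0
-- ===== Notes on version B (the rewrite author's own statement) =====
-- stated objective: simpler
-- what changed: Replaces A's recursive division-by-zero/IndexError exception trick with a single any() scan comparing coordinate sums directly against node's sum.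
import Mathlib
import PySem

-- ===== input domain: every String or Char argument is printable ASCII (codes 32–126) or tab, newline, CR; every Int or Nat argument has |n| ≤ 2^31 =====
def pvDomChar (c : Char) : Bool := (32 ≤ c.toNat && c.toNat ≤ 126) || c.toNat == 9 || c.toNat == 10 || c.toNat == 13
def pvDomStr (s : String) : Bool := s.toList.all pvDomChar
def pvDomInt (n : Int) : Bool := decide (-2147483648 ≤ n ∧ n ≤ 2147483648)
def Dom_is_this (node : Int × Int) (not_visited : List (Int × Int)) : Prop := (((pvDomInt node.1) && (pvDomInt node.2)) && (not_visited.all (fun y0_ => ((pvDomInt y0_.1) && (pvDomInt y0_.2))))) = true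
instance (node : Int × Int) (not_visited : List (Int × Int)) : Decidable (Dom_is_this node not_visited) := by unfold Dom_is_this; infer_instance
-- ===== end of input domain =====

-- B replaces A's recursive 1/(diff) exception trick with a single linear any() scan
-- comparing coordinate sums; same return value on all inputs (objective: simpler).

-- ===== PORT A =====
def is_this (node : Int × Int) (not_visited : List (Int × Int)) : Int :=
  match not_visited with
  | [] => 0  -- not_visited[0] raises IndexError → return 0
  | v :: rest =>
    if (node.1 - v.1) + (node.2 - v.2) = 0 then 1  -- 1/0 raises ZeroDivisionError → return 1
    else is_this node rest  -- recurse on not_visited[1:]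

-- ===== PORT B =====
def is_this_alt (node : Int × Int) (not_visited : List (Int × Int)) : Int :=
  if not_visited.any (fun v => v.1 + v.2 == node.1 + node.2) then 1 else 0

-- ===== PRECONDITION & SPEC =====
def Spec_is_this (node : Int × Int) (not_visited : List (Int × Int)) (out : Int) : Prop := out = is_this_alt node not_visited
instance (node : Int × Int) (not_visited : List (Int × Int)) (out : Int) : Decidable (Spec_is_this node not_visited out) := by unfold Spec_is_this; infer_instance

-- ===== CLAIM (what is proved, stated in full; the proofs are below) =====
def Claim_equal_is_this : Prop := ∀ (node : Int × Int) (not_visited : List (Int × Int)), Dom_is_this node not_visited → Spec_is_this node not_visited (is_this node not_visited)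

-- ===== LEMMAS AND PROOFS =====

-- ===== VERDICT (by name: the statement is the Claim_ definition above) =====
theorem is_this_eq (node : Int × Int) (nv : List (Int × Int)) :
    is_this node nv = is_this_alt node nv := by
  induction nv with
  | nil => simp [is_this, is_this_alt]
  | cons v rest ih =>
    simp only [is_this, is_this_alt, List.any_cons]
    by_cases h : (node.1 - v.1) + (node.2 - v.2) = 0
    · have hb : (v.1 + v.2 == node.1 + node.2) = true := by simp; omega
      simp [h, hb]
    · have hb : (v.1 + v.2 == node.1 + node.2) = false := by simp; omega
      simp only [hb, Bool.false_or, if_neg h]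
      simpa [is_this_alt] using ih

theorem is_this_spec : Claim_equal_is_this := by
  intro node nv _
  exact is_this_eq node nv
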